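-- pv_equiv track=rewrite | github.com/Shriya-Reddy/arrange_pichu | arrange_pichu.py | check_right_diag
-- ===== SOURCE A (Python) =====
-- def check_right_diag(new_house_map):
--     w = []
--     maxrow = len(new_house_map)
--     maxcol = len(new_house_map[0])
--     #######The following lines of code are referred from https://izziswift.com/get-all-the-diagonals-in-a-matrix-list-of-lists-in-python/ ######
--     rightdiag = [[] for _ in range(maxrow + maxcol - 1)]
--     for x in range(maxcol):
--         for y in range(maxrow):
--             rightdiag[x+y].append(new_house_map[y][x])
--     ################################################################################################################################################
--     for k in rightdiag:
--         p_pos = []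
--         x_pos = []
--         for m in range(0,len(k)):
--             if k[m] in "X@":
--                 x_pos.append(m)
--             if k[m] == 'p':
--                 p_pos.append(m)
--
--         for l in p_pos:
--             for i in range(l+1, len(k)):
--                 if k[i] == 'p':
--                     return False
--                 elif k[i] in "X@":
--                     w.append(True)
--                     break
--         x_pos = []
--         p_pos = []
--     if all(w):
--         return True
-- ===== SOURCE B (Python) =====
-- def check_right_diag(new_house_map):
--     maxrow = len(new_house_map)
--     maxcol = len(new_house_map[0])
--     pending = [False] * (maxrow + maxcol - 1)
--     for x in range(maxcol):
--         for y in range(maxrow):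
--             c = new_house_map[y][x]
--             if c == 'p':
--                 if pending[x + y]:
--                     return False
--                 pending[x + y] = True
--             elif c in "X@":
--                 pending[x + y] = False
--     return True
-- ===== Notes on version B (the rewrite author's own statement) =====
-- stated objective: faster
-- what changed: B replaces A's materialization of every right-diagonal followed by, per diagonal, a list of 'p' positions and a forward rescan from each 'p', with a single column-major pass over the grid keeping one boolean per diagonal ('a p with no wall after it is pending'), returning False the moment a pending diagonal meets another 'p'.
import Mathlib
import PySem

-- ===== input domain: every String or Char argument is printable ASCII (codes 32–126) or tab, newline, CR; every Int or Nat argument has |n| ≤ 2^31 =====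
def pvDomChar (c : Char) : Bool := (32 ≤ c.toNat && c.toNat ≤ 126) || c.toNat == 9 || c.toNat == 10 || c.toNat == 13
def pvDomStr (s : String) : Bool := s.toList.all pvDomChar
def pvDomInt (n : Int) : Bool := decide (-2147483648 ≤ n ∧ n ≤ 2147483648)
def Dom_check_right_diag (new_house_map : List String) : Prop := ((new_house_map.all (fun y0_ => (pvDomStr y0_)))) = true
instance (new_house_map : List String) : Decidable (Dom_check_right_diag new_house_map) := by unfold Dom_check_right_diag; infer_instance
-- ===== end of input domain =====

-- B: one linear column-major pass with a pending-'p' flag per diagonal instead of A's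
-- per-diagonal p-position lists with forward rescans (faster; return value only).

-- ===== PORT A =====
-- new_house_map[y][x]; exact wherever Python's double indexing succeeds (guaranteed by Pre_)
def pvCell (nhm : List String) (y x : Nat) : Char :=
  (PySem.Str.pyGet? ((PySem.List.pyGet? nhm (y : Int)).getD "") (x : Int)).getD ' '

def pvWall (c : Char) : Bool := c = 'X' || c = '@'

-- rightdiag = [[] ...]; for x ...: for y ...: rightdiag[x+y].append(...)
def pvBuild (nhm : List String) (R C : Nat) : List (List Char) :=
  (List.range C).foldl (fun rd x =>
    (List.range R).foldl (fun rd y =>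
      rd.set (x + y) ((rd.getD (x + y) []) ++ [pvCell nhm y x])) rd)
    (List.replicate (R + C - 1) [])

-- for m in range(0, len(k)): collect x_pos (.1) and p_pos (.2); m is the running index
def pvPos (m : Nat) : List Char → List Nat × List Nat
  | [] => ([], [])
  | c :: t =>
    ((if pvWall c then m :: (pvPos (m + 1) t).1 else (pvPos (m + 1) t).1),
     (if c = 'p' then m :: (pvPos (m + 1) t).2 else (pvPos (m + 1) t).2))

-- for i in range(l+1, len(k)): applied to k.drop (l+1) (same cells, same order);
-- some false = "return False", some true = "w.append(True); break", none = ran off the end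
def pvScan : List Char → Option Bool
  | [] => none
  | c :: t => if c = 'p' then some false else if pvWall c then some true else pvScan t

-- for l in p_pos: ... (none = the "return False" was taken)
def pvLoopP (k : List Char) (w : List Bool) : List Nat → Option (List Bool)
  | [] => some w
  | l :: rest =>
    match pvScan (k.drop (l + 1)) with
    | some false => none
    | some true => pvLoopP k (w ++ [true]) rest
    | none => pvLoopP k w rest

-- for k in rightdiag:
def pvLoopDiags (w : List Bool) : List (List Char) → Option (List Bool)
  | [] => some w
  | k :: rest =>
    match pvLoopP k w (pvPos 0 k).2 with
    | none => none
    | some w' => pvLoopDiags w' rest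

def check_right_diag (new_house_map : List String) : Option Bool :=
  let R := new_house_map.length
  let C := ((PySem.List.pyGet? new_house_map 0).getD "").toList.length
  match pvLoopDiags [] (pvBuild new_house_map R C) with
  | none => some false                              -- return False
  | some w => if w.all id then some true else none  -- if all(w): return True (else implicit None)

-- ===== PORT B =====
-- one cell step of B: pending[x+y] is the per-diagonal flag; none = "return False" taken
def pvStepB (nhm : List String) (x y : Nat) (st : Option (List Bool)) : Option (List Bool) :=
  match st with
  | none => none
  | some pend =>
    let c := pvCell nhm y x
    if c = 'p' then
      if pend.getD (x + y) false then none else some (pend.set (x + y) true)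
    else if pvWall c then some (pend.set (x + y) false)
    else some pend

def check_right_diag_alt (new_house_map : List String) : Option Bool :=
  let R := new_house_map.length
  let C := ((PySem.List.pyGet? new_house_map 0).getD "").toList.length
  match (List.range C).foldl (fun st x =>
      (List.range R).foldl (fun st y => pvStepB new_house_map x y st) st)
      (some (List.replicate (R + C - 1) false)) with
  | none => some false
  | some _ => some true

-- ===== PRECONDITION & SPEC =====
-- Pre_ excludes exactly the inputs where Python A raises: the empty map (new_house_map[0]
-- is an IndexError) and maps with a row shorter than row 0 (new_house_map[y][x] raises).
def Pre_check_right_diag (new_house_map : List String) : Prop :=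
  new_house_map ≠ [] ∧
  ∀ s ∈ new_house_map, (new_house_map.headD "").toList.length ≤ s.toList.length

instance (new_house_map : List String) : Decidable (Pre_check_right_diag new_house_map) := by
  unfold Pre_check_right_diag; infer_instance

def pvWitness_check_right_diag : List String := ["p.X", ".@p", "X.p"]

def Spec_check_right_diag (new_house_map : List String) (out : Option Bool) : Prop := out = check_right_diag_alt new_house_map
instance (new_house_map : List String) (out : Option Bool) : Decidable (Spec_check_right_diag new_house_map out) := by unfold Spec_check_right_diag; infer_instance

-- ===== CLAIM (what is proved, stated in full; the proofs are below) =====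
def Claim_equal_check_right_diag : Prop := ∀ (new_house_map : List String), Dom_check_right_diag new_house_map → Pre_check_right_diag new_house_map → Spec_check_right_diag new_house_map (check_right_diag new_house_map)

-- ===== LEMMAS AND PROOFS =====

-- reference flag run over one diagonal: none = a 'p' saw a 'p'
def pvRun : Bool → List Char → Option Bool
  | pend, [] => some pend
  | pend, c :: t =>
    if c = 'p' then (if pend then none else pvRun true t)
    else if pvWall c then pvRun false t
    else pvRun pend t

theorem pvRun_append (l t : List Char) (b : Bool) :
    pvRun b (l ++ t) = (pvRun b l).bind (fun b' => pvRun b' t) := by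
  induction l generalizing b with
  | nil => simp [pvRun]
  | cons c l ih =>
    simp only [List.cons_append, pvRun]
    split_ifs with h1 h2
    · rfl
    · exact ih true
    · exact ih false
    · exact ih b

theorem pvScan_false_run (t : List Char) (h : pvScan t = some false) : pvRun true t = none := by
  induction t with
  | nil => simp [pvScan] at h
  | cons c t ih =>
    simp only [pvScan] at h
    simp only [pvRun]
    split_ifs at h ⊢ with h1 h2
    · rfl
    · simp at h
    · exact ih h

theorem pvScan_not_false_run (t : List Char) (h : pvScan t ≠ some false) :
    (pvRun true t = none ↔ pvRun false t = none) := by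
  induction t with
  | nil => simp [pvRun]
  | cons c t ih =>
    by_cases h1 : c = 'p'
    · simp [pvScan, h1] at h
    · by_cases h2 : pvWall c
      · simp [pvRun, h1, h2]
      · simp only [pvScan, if_neg h1, if_neg h2] at h
        simp only [pvRun, if_neg h1, h2, Bool.false_eq_true, if_false]
        exact ih h

theorem pvPos_shift (t : List Char) (m : Nat) :
    (pvPos m t).2 = ((pvPos 0 t).2).map (· + m) := by
  induction t generalizing m with
  | nil => simp [pvPos]
  | cons c t ih =>
    simp only [pvPos]
    split_ifs with h1
    · simp only [List.map_cons, Nat.zero_add]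
      rw [ih (m + 1), ih 1, List.map_map]
      refine congrArg (m :: ·) (List.map_congr_left fun a _ => ?_)
      simp only [Function.comp_apply]
      omega
    · rw [ih (m + 1), ih 1, List.map_map]
      refine List.map_congr_left fun a _ => ?_
      simp only [Function.comp_apply]
      omega

theorem pvLoopP_shift (t : List Char) (c : Char) (ps : List Nat) (w : List Bool) :
    pvLoopP (c :: t) w (ps.map (· + 1)) = pvLoopP t w ps := by
  induction ps generalizing w with
  | nil => rfl
  | cons l rest ih =>
    simp only [List.map_cons, pvLoopP, List.drop_succ_cons]
    cases h : pvScan (t.drop (l + 1)) with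
    | none => exact ih w
    | some b => cases b with
      | false => rfl
      | true => exact ih (w ++ [true])

theorem pvLoopP_none_iff (k : List Char) (w : List Bool) :
    pvLoopP k w (pvPos 0 k).2 = none ↔ pvRun false k = none := by
  induction k generalizing w with
  | nil => simp [pvPos, pvLoopP, pvRun]
  | cons c t ih =>
    have hshift : (pvPos 1 t).2 = ((pvPos 0 t).2).map (· + 1) := pvPos_shift t 1
    by_cases h1 : c = 'p'
    · subst h1
      have hrun : pvRun false ('p' :: t) = pvRun true t := by simp [pvRun]
      have hpos : (pvPos 0 ('p' :: t)).2 = 0 :: ((pvPos 0 t).2).map (· + 1) := by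
        simp [pvPos, hshift]
      rw [hpos, hrun, pvLoopP]
      simp only [List.drop_succ_cons, List.drop_zero]
      cases hs : pvScan t with
      | none =>
        dsimp only
        rw [pvLoopP_shift, ih w]
        exact (pvScan_not_false_run t (by simp [hs])).symm
      | some b => cases b with
        | false => simp [pvScan_false_run t hs]
        | true =>
          dsimp only
          rw [pvLoopP_shift, ih (w ++ [true])]
          exact (pvScan_not_false_run t (by simp [hs])).symm
    · have hrun : pvRun false (c :: t) = pvRun false t := by
        by_cases h2 : pvWall c <;> simp [pvRun, h1, h2]
      rw [show (pvPos 0 (c :: t)).2 = ((pvPos 0 t).2).map (· + 1) from by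
        simp [pvPos, h1, hshift]]
      rw [pvLoopP_shift, ih w, hrun]

theorem pvLoopP_all (k : List Char) (ps : List Nat) (w w' : List Bool)
    (h : pvLoopP k w ps = some w') (hw : w.all id = true) : w'.all id = true := by
  induction ps generalizing w with
  | nil => simp only [pvLoopP, Option.some.injEq] at h; subst h; exact hw
  | cons l rest ih =>
    simp only [pvLoopP] at h
    cases hs : pvScan (k.drop (l + 1)) with
    | none => rw [hs] at h; exact ih w h hw
    | some b =>
      cases b with
      | false => rw [hs] at h; simp at h
      | true => rw [hs] at h; exact ih (w ++ [true]) h (by simp [hw])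

theorem pvLoopDiags_some (ks : List (List Char)) (w : List Bool)
    (h : ∀ k ∈ ks, pvRun false k ≠ none) (hw : w.all id = true) :
    ∃ w', pvLoopDiags w ks = some w' ∧ w'.all id = true := by
  induction ks generalizing w with
  | nil => exact ⟨w, rfl, hw⟩
  | cons k rest ih =>
    have hk := h k (by simp)
    simp only [pvLoopDiags]
    cases hp : pvLoopP k w (pvPos 0 k).2 with
    | none => exact absurd ((pvLoopP_none_iff k w).mp hp) hk
    | some w1 =>
      exact ih w1 (fun k' hk' => h k' (by simp [hk'])) (pvLoopP_all k _ w w1 hp hw)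

theorem pvLoopDiags_none (ks : List (List Char)) (w : List Bool)
    (h : ∃ k ∈ ks, pvRun false k = none) : pvLoopDiags w ks = none := by
  induction ks generalizing w with
  | nil => simp at h
  | cons k rest ih =>
    simp only [pvLoopDiags]
    cases hp : pvLoopP k w (pvPos 0 k).2 with
    | none => rfl
    | some w1 =>
      obtain ⟨k', hk', hr⟩ := h
      rcases List.mem_cons.mp hk' with rfl | hmem
      · exact absurd ((pvLoopP_none_iff k' w).mpr hr) (by simp [hp])
      · exact ih w1 ⟨k', hmem, hr⟩

theorem pvRun_singleton (b : Bool) (c : Char) :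
    pvRun b [c] = if c = 'p' then (if b then none else some true)
      else if pvWall c then some false else some b := by
  by_cases h1 : c = 'p' <;> by_cases h2 : pvWall c <;> simp [pvRun, h1, h2]

theorem pvGetD_set_self {α : Type} (l : List α) (i : Nat) (a dflt : α) (h : i < l.length) :
    (l.set i a).getD i dflt = a := by
  simp [List.getD, h]

theorem pvGetD_set_ne {α : Type} (l : List α) (i j : Nat) (a dflt : α) (h : i ≠ j) :
    (l.set i a).getD j dflt = l.getD j dflt := by
  simp [List.getD, h]

-- the joint invariant between A's partially built rightdiag and B's pending state
def pvInv (nmax : Nat) (rd : List (List Char)) (st : Option (List Bool)) : Prop :=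
  rd.length = nmax ∧
  match st with
  | none => ∃ d, d < nmax ∧ pvRun false (rd.getD d []) = none
  | some pend => pend.length = nmax ∧
      ∀ d, d < nmax → pvRun false (rd.getD d []) = some (pend.getD d false)

theorem pvInv_step (nhm : List String) (nmax x y : Nat) (rd : List (List Char))
    (st : Option (List Bool)) (hxy : x + y < nmax) (h : pvInv nmax rd st) :
    pvInv nmax (rd.set (x + y) ((rd.getD (x + y) []) ++ [pvCell nhm y x])) (pvStepB nhm x y st) := by
  obtain ⟨hlen, hst⟩ := h
  have hxy' : x + y < rd.length := by omega
  cases st with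
  | none =>
    obtain ⟨d, hd, hr⟩ := hst
    refine ⟨by simp [hlen], ?_⟩
    simp only [pvStepB]
    by_cases hdd : d = x + y
    · refine ⟨x + y, hdd ▸ hd, ?_⟩
      have hr' : pvRun false (rd.getD (x + y) []) = none := hdd ▸ hr
      rw [pvGetD_set_self _ _ _ _ hxy', pvRun_append, hr']
      rfl
    · exact ⟨d, hd, by rw [pvGetD_set_ne _ _ _ _ _ (fun e => hdd e.symm)]; exact hr⟩
  | some pend =>
    obtain ⟨hplen, hall⟩ := hst
    have hpnd := hall (x + y) hxy
    have hxp : x + y < pend.length := by omega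
    have hnew : pvRun false (rd.getD (x + y) [] ++ [pvCell nhm y x])
        = pvRun (pend.getD (x + y) false) [pvCell nhm y x] := by
      rw [pvRun_append, hpnd]; rfl
    simp only [pvStepB]
    by_cases hp : pvCell nhm y x = 'p'
    · rw [hp] at hnew
      by_cases hb : pend.getD (x + y) false = true
      · simp only [hp, hb, if_true]
        refine ⟨by simp [hlen], x + y, hxy, ?_⟩
        rw [pvGetD_set_self _ _ _ _ hxy', hnew, hb, pvRun_singleton]
        simp
      · simp only [hp, hb]
        refine ⟨by simp [hlen], by simp [hplen], ?_⟩
        intro d hd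
        by_cases hdd : d = x + y
        · subst hdd
          rw [pvGetD_set_self _ _ _ _ hxy', pvGetD_set_self _ _ _ _ hxp, hnew,
            eq_false_of_ne_true hb, pvRun_singleton]
          simp
        · rw [pvGetD_set_ne _ _ _ _ _ (fun e => hdd e.symm),
            pvGetD_set_ne _ _ _ _ _ (fun e => hdd e.symm)]
          exact hall d hd
    · by_cases hw : pvWall (pvCell nhm y x) = true
      · simp only [if_neg hp, hw, if_true]
        refine ⟨by simp [hlen], by simp [hplen], ?_⟩
        intro d hd
        by_cases hdd : d = x + y
        · subst hdd
          rw [pvGetD_set_self _ _ _ _ hxy', pvGetD_set_self _ _ _ _ hxp, hnew, pvRun_singleton]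
          simp [hp, hw]
        · rw [pvGetD_set_ne _ _ _ _ _ (fun e => hdd e.symm),
            pvGetD_set_ne _ _ _ _ _ (fun e => hdd e.symm)]
          exact hall d hd
      · simp only [if_neg hp, hw]
        refine ⟨by simp [hlen], hplen, ?_⟩
        intro d hd
        by_cases hdd : d = x + y
        · subst hdd
          rw [pvGetD_set_self _ _ _ _ hxy', hnew, pvRun_singleton]
          simp [hp, hw]
        · rw [pvGetD_set_ne _ _ _ _ _ (fun e => hdd e.symm)]
          exact hall d hd

theorem pvInv_inner (nhm : List String) (nmax x : Nat) (ys : List Nat)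
    (rd : List (List Char)) (st : Option (List Bool))
    (hys : ∀ y ∈ ys, x + y < nmax) (h : pvInv nmax rd st) :
    pvInv nmax (ys.foldl (fun rd y => rd.set (x + y) ((rd.getD (x + y) []) ++ [pvCell nhm y x])) rd)
      (ys.foldl (fun st y => pvStepB nhm x y st) st) := by
  induction ys generalizing rd st with
  | nil => exact h
  | cons y ys ih =>
    simp only [List.foldl_cons]
    exact ih _ _ (fun y' hy' => hys y' (by simp [hy'])) (pvInv_step nhm nmax x y rd st (hys y (by simp)) h)

theorem pvInv_outer (nhm : List String) (R C : Nat) (xs : List Nat)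
    (rd : List (List Char)) (st : Option (List Bool))
    (hxs : ∀ x ∈ xs, x < C) (h : pvInv (R + C - 1) rd st) :
    pvInv (R + C - 1)
      (xs.foldl (fun rd x => (List.range R).foldl (fun rd y => rd.set (x + y) ((rd.getD (x + y) []) ++ [pvCell nhm y x])) rd) rd)
      (xs.foldl (fun st x => (List.range R).foldl (fun st y => pvStepB nhm x y st) st) st) := by
  induction xs generalizing rd st with
  | nil => exact h
  | cons x xs ih =>
    simp only [List.foldl_cons]
    refine ih _ _ (fun x' hx' => hxs x' (by simp [hx'])) ?_
    refine pvInv_inner nhm (R + C - 1) x (List.range R) rd st (fun y hy => ?_) h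
    have hy' := List.mem_range.mp hy
    have hx' := hxs x (by simp)
    omega

theorem pvMain (nhm : List String) (R C : Nat) :
    (match pvLoopDiags []
        ((List.range C).foldl (fun rd x =>
          (List.range R).foldl (fun rd y =>
            rd.set (x + y) ((rd.getD (x + y) []) ++ [pvCell nhm y x])) rd)
          (List.replicate (R + C - 1) [])) with
      | none => some false
      | some w => if w.all id then some true else none) =
    (match (List.range C).foldl (fun st x =>
        (List.range R).foldl (fun st y => pvStepB nhm x y st) st)
        (some (List.replicate (R + C - 1) false)) with
      | none => some false
      | some _ => (some true : Option Bool)) := by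
  have hbase : pvInv (R + C - 1) (List.replicate (R + C - 1) [])
      (some (List.replicate (R + C - 1) false)) := by
    refine ⟨by simp, by simp, ?_⟩
    intro d hd
    simp only [List.getD, List.getElem?_replicate]
    split <;> simp [pvRun]
  have hfold := pvInv_outer nhm R C (List.range C)
    (List.replicate (R + C - 1) []) (some (List.replicate (R + C - 1) false))
    (fun x hx => List.mem_range.mp hx) hbase
  set rdF := (List.range C).foldl (fun rd x =>
      (List.range R).foldl (fun rd y =>
        rd.set (x + y) ((rd.getD (x + y) []) ++ [pvCell nhm y x])) rd)
      (List.replicate (R + C - 1) []) with hrdF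
  set stF := (List.range C).foldl (fun st x =>
      (List.range R).foldl (fun st y => pvStepB nhm x y st) st)
      (some (List.replicate (R + C - 1) false)) with hstFdef
  obtain ⟨hlen, hst⟩ := hfold
  cases hstF : stF with
  | none =>
    rw [hstF] at hst
    obtain ⟨d, hd, hr⟩ := hst
    have hmem : rdF.getD d [] ∈ rdF := by
      rw [List.getD_eq_getElem _ _ (by omega : d < rdF.length)]
      exact List.getElem_mem _
    rw [pvLoopDiags_none rdF [] ⟨_, hmem, hr⟩]
  | some pend =>
    rw [hstF] at hst
    obtain ⟨hplen, hall⟩ := hst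
    have hforall : ∀ k ∈ rdF, pvRun false k ≠ none := by
      intro k hk
      obtain ⟨d, hd, rfl⟩ := List.mem_iff_getElem.mp hk
      rw [← List.getD_eq_getElem _ ([] : List Char) hd, hall d (by omega)]
      simp
    obtain ⟨w', hw', hallw⟩ := pvLoopDiags_some rdF [] hforall rfl
    rw [hw']
    dsimp only
    rw [if_pos hallw]

-- ===== VERDICT (by name: the statement is the Claim_ definition above) =====
theorem check_right_diag_spec : Claim_equal_check_right_diag := by
  unfold Claim_equal_check_right_diag
  intro nhm _ _
  unfold Spec_check_right_diag check_right_diag check_right_diag_alt pvBuild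
  exact pvMain nhm nhm.length ((PySem.List.pyGet? nhm 0).getD "").toList.length
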